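-- pv_equiv track=rewrite | github.com/tonycasper/LingProg | Exercicio4/atv06.py | espiao
-- ===== SOURCE A (Python) =====
-- def espiao(lista):
-- 	status="nada"
-- 	for simbolo in lista:
-- 		if simbolo == 0:
-- 			if status == "nada":
-- 			 	status = "zero"
-- 			elif status == "zero":
-- 				status = "zero zero"
-- 		elif simbolo == 7:
-- 			if status == "zero zero":
-- 				status = "zero zero sete"
-- 				return True
-- 			else:
-- 				return False
-- ===== SOURCE B (Python) =====
-- def espiao(lista):
--     try:
--         idx = lista.index(7)
--     except ValueError:
--         return None
--     return lista[:idx].count(0) >= 2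
-- ===== Notes on version B (the rewrite author's own statement) =====
-- stated objective: simpler
-- what changed: Replaces A's single-pass string-labelled state machine with a locate-then-aggregate decomposition: find the first 7 with list.index, then count zeros in the prefix before it.
import Mathlib
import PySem

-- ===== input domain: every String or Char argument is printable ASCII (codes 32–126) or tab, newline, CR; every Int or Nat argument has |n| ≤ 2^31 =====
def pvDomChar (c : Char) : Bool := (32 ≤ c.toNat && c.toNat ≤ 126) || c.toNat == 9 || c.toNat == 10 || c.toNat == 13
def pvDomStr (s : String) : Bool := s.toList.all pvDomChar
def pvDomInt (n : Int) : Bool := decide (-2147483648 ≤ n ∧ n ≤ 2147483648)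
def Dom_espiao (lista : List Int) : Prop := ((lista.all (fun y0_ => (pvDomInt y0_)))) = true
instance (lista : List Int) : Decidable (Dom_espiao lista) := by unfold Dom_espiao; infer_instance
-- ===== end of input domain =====

-- B replaces A's string-labelled state machine by locate-the-first-7 then count zeros in the prefix (simpler decomposition, same cost).

-- ===== PORT A =====
-- literal port of A's for-loop with the string status variable
def espiaoLoop : List Int → String → Option Bool
  | [], _ => none
  | simbolo :: rest, status =>
    if simbolo == 0 then
      if status == "nada" then espiaoLoop rest "zero"
      else if status == "zero" then espiaoLoop rest "zero zero"
      else espiaoLoop rest status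
    else if simbolo == 7 then
      if status == "zero zero" then some true else some false
    else espiaoLoop rest status

def espiao (lista : List Int) : Option Bool := espiaoLoop lista "nada"

-- ===== PORT B =====
def espiao_alt (lista : List Int) : Option Bool :=
  match PySem.List.index? lista 7 with
  | none => none
  | some idx => some (decide (PySem.List.count (PySem.List.slice lista none (some (idx : Int))) 0 ≥ 2))

-- ===== PRECONDITION & SPEC =====
def Spec_espiao (lista : List Int) (out : Option Bool) : Prop := out = espiao_alt lista
instance (lista : List Int) (out : Option Bool) : Decidable (Spec_espiao lista out) := by unfold Spec_espiao; infer_instance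

-- ===== CLAIM (what is proved, stated in full; the proofs are below) =====
def Claim_equal_espiao : Prop := ∀ (lista : List Int), Dom_espiao lista → Spec_espiao lista (espiao lista)

-- ===== LEMMAS AND PROOFS =====

def statusOf : Nat → String
  | 0 => "nada"
  | 1 => "zero"
  | _ => "zero zero"

theorem espiaoLoop_eq (l : List Int) : ∀ k : Nat, k ≤ 2 →
    espiaoLoop l (statusOf k) =
      match PySem.List.index? l 7 with
      | none => none
      | some i => some (decide ((l.take i).count 0 + k ≥ 2)) := by
  induction l with
  | nil => intro k hk; simp [espiaoLoop, PySem.List.index?]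
  | cons x xs ih =>
    intro k hk
    by_cases hx0 : x = 0
    · subst hx0
      have hidx : PySem.List.index? ((0:Int) :: xs) 7 = (PySem.List.index? xs 7).map (· + 1) :=
        PySem.List.index?_cons_of_ne xs (show (0:Int) ≠ 7 by decide)
      have hstep : espiaoLoop ((0:Int) :: xs) (statusOf k) = espiaoLoop xs (statusOf (min (k+1) 2)) := by
        interval_cases k <;> simp [espiaoLoop, statusOf]
      rw [hstep, ih (min (k+1) 2) (by omega), hidx]
      cases PySem.List.index? xs 7 with
      | none => rfl
      | some i =>
        simp only [Option.map_some]
        congr 1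
        have : ((0:Int) :: xs).take (i+1) = 0 :: xs.take i := rfl
        rw [this]
        simp only [List.count_cons_self]
        by_cases h2 : (xs.take i).count 0 + (k+1) ≥ 2 <;> [skip; skip] <;>
          · simp only [decide_eq_decide]; omega
    · by_cases hx7 : x = 7
      · subst hx7
        have hidx : PySem.List.index? ((7:Int) :: xs) 7 = some 0 := PySem.List.index?_cons_self (7:Int) xs
        rw [hidx]
        interval_cases k <;> simp [espiaoLoop, statusOf]
      · have hidx : PySem.List.index? (x :: xs) 7 = (PySem.List.index? xs 7).map (· + 1) :=
          PySem.List.index?_cons_of_ne xs hx7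
        have hstep : espiaoLoop (x :: xs) (statusOf k) = espiaoLoop xs (statusOf k) := by
          simp [espiaoLoop, hx0, hx7]
        rw [hstep, ih k hk, hidx]
        cases PySem.List.index? xs 7 with
        | none => rfl
        | some i =>
          simp only [Option.map_some]
          congr 2
          have : (x :: xs).take (i+1) = x :: xs.take i := rfl
          rw [this, List.count_cons_of_ne (by simpa using hx0)]

-- ===== VERDICT (by name: the statement is the Claim_ definition above) =====
theorem espiao_spec : Claim_equal_espiao := by
  intro lista _
  unfold Spec_espiao espiao espiao_alt
  have h := espiaoLoop_eq lista 0 (by omega)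
  rw [show "nada" = statusOf 0 from rfl, h]
  cases hix : PySem.List.index? lista 7 with
  | none => rfl
  | some i =>
    simp [PySem.List.count, PySem.List.slice_to_natCast]
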